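-- pv_equiv track=rewrite | github.com/dalembertian/advent-of-code | 2024/14/solve.py | find_easter_egg
-- ===== SOURCE A (Python) =====
-- from collections import defaultdict
--
-- def find_easter_egg(width, length, positions, velocities):
--     # "(...) very rarely, most of the robots should arrange themselves into a picture
--     # of a Christmas tree".
--     # Very little detail given, I assume it means non-overlapping robots
--     # TODO: Change to look for the "frame"!
--     solutions = []
--     for i in range(10000):
--         robots = defaultdict(int)
--         success = True
--         for (x, y), (vx, vy) in zip(positions, velocities):
--             nx = (x + i * vx) % width
--             ny = (y + i * vy) % length
--             if robots[(nx, ny)] != 0: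
--                 success = False
--                 break
--             else:
--                 robots[(nx, ny)] = 1
--         if success:
--             solutions.append(i)
--     return solutions
-- ===== SOURCE B (Python) =====
-- def find_easter_egg(width, length, positions, velocities):
--     # Sort-then-scan duplicate detection: for each step, sort the robots' cells
--     # (tuple lexicographic order) and accept the step iff no two ADJACENT sorted
--     # cells are equal -- comparison sorting instead of hash-table membership.
--     solutions = []
--     for i in range(10000):
--         cells = sorted(((x + i * vx) % width, (y + i * vy) % length)
--                        for (x, y), (vx, vy) in zip(positions, velocities))
--         if all(a != b for a, b in zip(cells, cells[1:])):
--             solutions.append(i)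
--     return solutions
-- ===== Notes on version B (the rewrite author's own statement) =====
-- stated objective: alternative
-- what changed: Per-step duplicate detection is a different algorithm: A incrementally marks cells in a defaultdict and breaks on the first hash-table hit, while B sorts the step's full cell list lexicographically and scans only adjacent pairs for an equal neighbour (comparison sorting instead of hashing; no dict, no early break).
-- outside the precondition, e.g. on find_easter_egg(0, 5, [(1, 2)], [(3, 4)]): A raises ZeroDivisionError, B raises ZeroDivisionError
import Mathlib
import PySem

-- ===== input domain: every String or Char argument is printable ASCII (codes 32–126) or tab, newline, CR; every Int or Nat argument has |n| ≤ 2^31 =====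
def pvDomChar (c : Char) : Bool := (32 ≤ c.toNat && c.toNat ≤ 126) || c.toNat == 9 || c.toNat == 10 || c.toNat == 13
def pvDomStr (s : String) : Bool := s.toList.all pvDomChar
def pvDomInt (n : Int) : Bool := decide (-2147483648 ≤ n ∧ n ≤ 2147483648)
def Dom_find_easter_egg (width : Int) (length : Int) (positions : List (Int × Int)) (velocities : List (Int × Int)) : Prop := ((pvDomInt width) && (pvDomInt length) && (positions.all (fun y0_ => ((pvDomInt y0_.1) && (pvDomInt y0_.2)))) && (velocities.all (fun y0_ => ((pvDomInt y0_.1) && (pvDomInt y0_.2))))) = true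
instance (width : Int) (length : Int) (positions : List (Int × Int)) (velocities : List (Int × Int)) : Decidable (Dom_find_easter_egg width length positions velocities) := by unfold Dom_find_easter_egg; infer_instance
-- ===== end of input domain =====

-- B replaces A's incremental dict-with-early-break duplicate detection per step by a different
-- algorithm: sort the step's cells lexicographically, then scan adjacent pairs for an equal
-- neighbour (comparison sorting instead of hashing; objective: alternative).

-- ===== PORT A =====
-- inner 'for (x, y), (vx, vy) in zip(...)' loop with the defaultdict 'robots' and the break;
-- returns the final value of 'success'
def pvA_inner (width length i : Int) :
    List ((Int × Int) × (Int × Int)) → PySem.Dict (Int × Int) Int → Bool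
  | [], _ => true
  | (((x, y), (vx, vy)) :: rest), robots =>
      let nx := PySem.Int.mod (x + i * vx) width
      let ny := PySem.Int.mod (y + i * vy) length
      if PySem.Dict.getD robots (nx, ny) 0 ≠ 0 then false
      else pvA_inner width length i rest (PySem.Dict.insert robots (nx, ny) 1)

def find_easter_egg (width : Int) (length : Int) (positions : List (Int × Int)) (velocities : List (Int × Int)) : List Int :=
  (PySem.List.pyRange 0 10000 1).foldl
    (fun solutions i =>
      if pvA_inner width length i (positions.zip velocities) PySem.Dict.empty then
        solutions ++ [i]
      else solutions) []

-- ===== PORT B =====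
-- sorted(<tuple generator>) is Python's lexicographic tuple sort: PySem.List.sorted2 with the
-- two component keys; 'zip(cells, cells[1:])' is cells.zip (cells.drop 1) ('[1:]' = drop 1).
def find_easter_egg_alt (width : Int) (length : Int) (positions : List (Int × Int)) (velocities : List (Int × Int)) : List Int :=
  (PySem.List.pyRange 0 10000 1).foldl
    (fun solutions i =>
      let cells := PySem.List.sorted2
        ((positions.zip velocities).map (fun p =>
          (PySem.Int.mod (p.1.1 + i * p.2.1) width, PySem.Int.mod (p.1.2 + i * p.2.2) length)))
        Prod.fst Prod.snd
      if (cells.zip (cells.drop 1)).all (fun ab => ab.1 ≠ ab.2) then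
        solutions ++ [i]
      else solutions) []

-- ===== PRECONDITION & SPEC =====
-- Pre_ excludes exactly the inputs where Python's '%' raises ZeroDivisionError:
-- width = 0 or length = 0 while zip(positions, velocities) is non-empty.
def Pre_find_easter_egg (width : Int) (length : Int) (positions : List (Int × Int)) (velocities : List (Int × Int)) : Prop :=
  positions = [] ∨ velocities = [] ∨ (width ≠ 0 ∧ length ≠ 0)
instance (width : Int) (length : Int) (positions : List (Int × Int)) (velocities : List (Int × Int)) : Decidable (Pre_find_easter_egg width length positions velocities) := by unfold Pre_find_easter_egg; infer_instance

def pvWitness_find_easter_egg : Int × Int × (List (Int × Int)) × (List (Int × Int)) :=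
  (11, 7, [(0, 0), (1, 1)], [(1, 2), (3, 1)])

def Spec_find_easter_egg (width : Int) (length : Int) (positions : List (Int × Int)) (velocities : List (Int × Int)) (out : List Int) : Prop := out = find_easter_egg_alt width length positions velocities
instance (width : Int) (length : Int) (positions : List (Int × Int)) (velocities : List (Int × Int)) (out : List Int) : Decidable (Spec_find_easter_egg width length positions velocities out) := by unfold Spec_find_easter_egg; infer_instance

-- ===== CLAIM (what is proved, stated in full; the proofs are below) =====
def Claim_equal_find_easter_egg : Prop := ∀ (width : Int) (length : Int) (positions : List (Int × Int)) (velocities : List (Int × Int)), Dom_find_easter_egg width length positions velocities → Pre_find_easter_egg width length positions velocities → Spec_find_easter_egg width length positions velocities (find_easter_egg width length positions velocities)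

-- ===== LEMMAS AND PROOFS =====

-- the cell a robot (p, v) occupies at step i (proof-side abbreviation, defeq to the ports' lambdas)
def pvCell (width length i : Int) (p : (Int × Int) × (Int × Int)) : Int × Int :=
  (PySem.Int.mod (p.1.1 + i * p.2.1) width, PySem.Int.mod (p.1.2 + i * p.2.2) length)

-- the lexicographic strict comparison sorted2 uses on (Int × Int) with keys fst, snd
def pvLt (a b : Int × Int) : Bool :=
  decide (a.1 < b.1) || (!decide (b.1 < a.1) && decide (a.2 < b.2))

theorem pvLt_iff (a b : Int × Int) :
    pvLt a b = true ↔ (a.1 < b.1 ∨ (a.1 = b.1 ∧ a.2 < b.2)) := by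
  unfold pvLt
  simp only [Bool.or_eq_true, Bool.and_eq_true, Bool.not_eq_true', decide_eq_true_eq,
    decide_eq_false_iff_not]
  omega

theorem pvLt_asymm (a b : Int × Int) (h : pvLt a b = true) : pvLt b a = false := by
  rw [← Bool.not_eq_true, pvLt_iff]; rw [pvLt_iff] at h; omega

theorem pvLt_trans (a b c : Int × Int) (h1 : pvLt a b = true) (h2 : pvLt b c = true) :
    pvLt a c = true := by
  rw [pvLt_iff] at h1 h2 ⊢; omega

theorem pvLt_total_eq (a b : Int × Int) (hab : pvLt a b = false) (hba : pvLt b a = false) :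
    a = b := by
  rw [← Bool.not_eq_true, pvLt_iff] at hab hba
  obtain ⟨a1, a2⟩ := a; obtain ⟨b1, b2⟩ := b
  simp only [not_or, not_and, not_lt] at hab hba
  have h : a1 = b1 ∧ a2 = b2 := by constructor <;> omega
  simp [h.1, h.2]

theorem pvLt_asymm_trans (x y z : Int × Int) (hxy : pvLt x y = true) (hzy : pvLt z y = false) :
    pvLt z x = false := by
  rw [pvLt_iff] at hxy
  rw [← Bool.not_eq_true, pvLt_iff] at hzy ⊢
  omega

-- insertion preserves the sortedness invariant Pairwise (pvLt b a = false)
theorem pv_pairwise_insertBy (x : Int × Int) (ys : List (Int × Int))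
    (h : ys.Pairwise (fun a b => pvLt b a = false)) :
    (PySem.List.insertBy pvLt x ys).Pairwise (fun a b => pvLt b a = false) := by
  induction ys with
  | nil => simp [PySem.List.insertBy]
  | cons y ys ih =>
      rw [List.pairwise_cons] at h
      show (if pvLt x y = true then x :: y :: ys else y :: PySem.List.insertBy pvLt x ys).Pairwise _
      by_cases hxy : pvLt x y = true
      · rw [if_pos hxy]
        refine List.Pairwise.cons ?_ (List.Pairwise.cons h.1 h.2)
        intro z hz
        rcases List.mem_cons.mp hz with rfl | hz
        · exact pvLt_asymm x z hxy
        · exact pvLt_asymm_trans x y z hxy (h.1 z hz)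
      · rw [if_neg hxy]
        refine List.Pairwise.cons ?_ (ih h.2)
        intro z hz
        rcases (PySem.List.mem_insertBy pvLt x z ys).mp hz with rfl | hz
        · exact Bool.eq_false_iff.mpr hxy
        · exact h.1 z hz

theorem pv_pairwise_foldl (xs acc : List (Int × Int))
    (h : acc.Pairwise (fun a b => pvLt b a = false)) :
    (xs.foldl (fun acc x => PySem.List.insertBy pvLt x acc) acc).Pairwise
      (fun a b => pvLt b a = false) := by
  induction xs generalizing acc with
  | nil => exact h
  | cons x xs ih => exact ih _ (pv_pairwise_insertBy x acc h)

-- sorted2 with keys fst, snd IS insertion sort by pvLt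
theorem pv_sorted2_eq (xs : List (Int × Int)) :
    PySem.List.sorted2 xs Prod.fst Prod.snd =
      xs.foldl (fun acc x => PySem.List.insertBy pvLt x acc) [] := rfl

theorem pv_sorted2_pairwise (xs : List (Int × Int)) :
    (PySem.List.sorted2 xs Prod.fst Prod.snd).Pairwise (fun a b => pvLt b a = false) := by
  rw [pv_sorted2_eq]
  exact pv_pairwise_foldl xs [] List.Pairwise.nil

-- the adjacent-pair scan of B, as Chain'
theorem pv_zip_all_iff_chain (s : List (Int × Int)) :
    ((s.zip (s.drop 1)).all (fun ab => ab.1 ≠ ab.2) = true) ↔ List.IsChain (· ≠ ·) s := by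
  induction s with
  | nil => simp
  | cons a s ih =>
      cases s with
      | nil => simp
      | cons b t =>
          rw [List.isChain_cons_cons, ← ih]
          simp [List.all_cons]

-- on a sorted list, adjacent distinctness propagates to strict pairwise order
theorem pv_strict_of_chain (s : List (Int × Int))
    (hs : s.Pairwise (fun a b => pvLt b a = false)) (hc : List.IsChain (· ≠ ·) s) :
    s.Pairwise (fun a b => pvLt a b = true) := by
  induction s with
  | nil => exact List.Pairwise.nil
  | cons a t ih =>
      rw [List.pairwise_cons] at hs
      rw [List.isChain_cons] at hc
      have ht := ih hs.2 hc.2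
      refine List.pairwise_cons.mpr ⟨?_, ht⟩
      intro z hz
      cases t with
      | nil => cases hz
      | cons b t' =>
          have hab_ne : a ≠ b := hc.1 b rfl
          have hab : pvLt a b = true := by
            rcases Bool.eq_false_or_eq_true (pvLt a b) with htr | hf
            · exact htr
            · exact absurd (pvLt_total_eq a b hf (hs.1 b (List.mem_cons_self))) hab_ne
          rcases List.mem_cons.mp hz with rfl | hz'
          · exact hab
          · exact pvLt_trans a b z hab ((List.pairwise_cons.mp ht).1 z hz')

-- on a lexicographically sorted list, no equal adjacent pair ⟺ no duplicates at all
theorem pv_sorted_nodup_iff (s : List (Int × Int))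
    (hs : s.Pairwise (fun a b => pvLt b a = false)) :
    List.IsChain (· ≠ ·) s ↔ s.Nodup := by
  constructor
  · intro hc
    exact (pv_strict_of_chain s hs hc).imp (fun {a b} h => by
      rw [pvLt_iff] at h; rintro rfl; omega)
  · intro hn
    exact List.Pairwise.isChain hn

-- characterisation of A's inner loop: success ⟺ the cells are pairwise distinct and
-- none of them is already marked in the dict
theorem pv_inner_iff (width length i : Int)
    (pairs : List ((Int × Int) × (Int × Int))) (robots : PySem.Dict (Int × Int) Int) :
    pvA_inner width length i pairs robots = true ↔
      ((pairs.map (pvCell width length i)).Nodup ∧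
        ∀ c ∈ pairs.map (pvCell width length i), PySem.Dict.getD robots c 0 = 0) := by
  induction pairs generalizing robots with
  | nil => simp [pvA_inner]
  | cons hd tl ih =>
      obtain ⟨⟨x, y⟩, ⟨vx, vy⟩⟩ := hd
      show (if PySem.Dict.getD robots (pvCell width length i ((x, y), (vx, vy))) 0 ≠ 0 then false
            else pvA_inner width length i tl
              (PySem.Dict.insert robots (pvCell width length i ((x, y), (vx, vy))) 1)) = true ↔ _
      set c0 := pvCell width length i ((x, y), (vx, vy)) with hc0
      by_cases h0 : PySem.Dict.getD robots c0 0 = 0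
      · rw [if_neg (by simpa using h0), ih]
        simp only [List.map_cons, List.nodup_cons, List.mem_cons, ← hc0]
        constructor
        · rintro ⟨hnd, hall⟩
          have hmem : c0 ∉ tl.map (pvCell width length i) := by
            intro hm
            have h1 := hall c0 hm
            rw [PySem.Dict.getD_insert, if_pos rfl] at h1
            exact one_ne_zero h1
          refine ⟨⟨hmem, hnd⟩, ?_⟩
          rintro c (rfl | hc)
          · exact h0
          · have h1 := hall c hc
            rw [PySem.Dict.getD_insert] at h1
            rcases eq_or_ne c c0 with rfl | hne
            · exact h0
            · rwa [if_neg hne] at h1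
        · rintro ⟨⟨hmem, hnd⟩, hall⟩
          refine ⟨hnd, fun c hc => ?_⟩
          rw [PySem.Dict.getD_insert, if_neg (fun he => hmem (by rw [← he]; exact hc))]
          exact hall c (Or.inr hc)
      · rw [if_pos (by simpa using h0)]
        simp only [List.map_cons, List.mem_cons, ← hc0]
        constructor
        · intro h; exact (Bool.false_ne_true h).elim
        · rintro ⟨_, hall⟩
          exact absurd (hall c0 (Or.inl rfl)) h0

-- per-step agreement: A's early-break dict test and B's sort-and-scan test decide the same thing
theorem pv_step_eq (width length i : Int) (positions velocities : List (Int × Int)) :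
    pvA_inner width length i (positions.zip velocities) PySem.Dict.empty =
      ((PySem.List.sorted2 ((positions.zip velocities).map (pvCell width length i))
          Prod.fst Prod.snd).zip
        ((PySem.List.sorted2 ((positions.zip velocities).map (pvCell width length i))
          Prod.fst Prod.snd).drop 1)).all (fun ab => ab.1 ≠ ab.2) := by
  rw [Bool.eq_iff_iff, pv_inner_iff]
  set cells := (positions.zip velocities).map (pvCell width length i)
  rw [pv_zip_all_iff_chain,
    pv_sorted_nodup_iff _ (pv_sorted2_pairwise cells),
    (PySem.List.sorted2_perm cells Prod.fst Prod.snd false).nodup_iff]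
  constructor
  · exact fun h => h.1
  · intro h
    refine ⟨h, fun c _ => ?_⟩
    simp [PySem.Dict.getD, PySem.Dict.get?, PySem.Dict.empty]

-- ===== VERDICT =====
theorem find_easter_egg_spec : Claim_equal_find_easter_egg := by
  intro width length positions velocities _ _
  unfold Spec_find_easter_egg find_easter_egg find_easter_egg_alt
  apply PySem.List.foldl_congr_mem
  intro acc i _
  show (if pvA_inner width length i (positions.zip velocities) PySem.Dict.empty then
          acc ++ [i] else acc) =
       (let cells := PySem.List.sorted2
            ((positions.zip velocities).map (pvCell width length i)) Prod.fst Prod.snd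
        if (cells.zip (cells.drop 1)).all (fun ab => ab.1 ≠ ab.2) then acc ++ [i] else acc)
  rw [pv_step_eq]
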